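-- pv_equiv track=rewrite | github.com/pypi-data/pypi-mirror-357 | packages/ez-hangul/ez_hangul-0.1.0.tar.gz/ez_hangul-0.1.0/ez-hangul/__init__.py | native_number
-- ===== SOURCE A (Python) =====
-- def native_number(n: int) -> str:
--     """숫자 → 순우리말로 변환 (1~99999 정도 권장)"""
--     units = ['', '하나', '둘', '셋', '넷', '다섯', '여섯', '일곱', '여덟', '아홉']
--     tens = ['', '열', '스물', '서른', '마흔', '쉰', '예순', '일흔', '여든', '아흔']
--     hundreds = ['', '백', '이백', '삼백', '사백', '오백', '육백', '칠백', '팔백', '구백']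
--     thousands = ['', '천', '이천', '삼천', '사천', '오천', '육천', '칠천', '팔천', '구천']
--     m = ['', '만', '이만', '삼만', '사만', '오만', '육만', '칠만', '팔만', '구만']
--
--     if n == 0:
--         return '영'
--     if n < 10:
--         return units[n]
--     elif n < 100:
--         ten, unit = divmod(n, 10)
--         return tens[ten] + (units[unit] if unit != 0 else '')
--     elif n < 1000:
--         hun, rem = divmod(n, 100)
--         return hundreds[hun] + (native_number(rem) if rem else '')
--     elif n < 10000:
--         tho, rem = divmod(n, 1000)
--         return thousands[tho] + (native_number(rem) if rem else '')
--     elif n < 100000: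
--         tho, rem = divmod(n, 10000)
--         return m[tho] + (native_number(rem) if rem else '')
--     else:
--         return str(n)  # 너무 큰 수는 숫자로 그대로 반환
-- ===== SOURCE B (Python) =====
-- def native_number(n: int) -> str:
--     """숫자 → 순우리말로 변환 (1~99999); outside 0..99999 the number is returned as digits."""
--     units = ['', '하나', '둘', '셋', '넷', '다섯', '여섯', '일곱', '여덟', '아홉']
--     tens = ['', '열', '스물', '서른', '마흔', '쉰', '예순', '일흔', '여든', '아흔']
--     hundreds = ['', '백', '이백', '삼백', '사백', '오백', '육백', '칠백', '팔백', '구백']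
--     thousands = ['', '천', '이천', '삼천', '사천', '오천', '육천', '칠천', '팔천', '구천']
--     m = ['', '만', '이만', '삼만', '사만', '오만', '육만', '칠만', '팔만', '구만']
--
--     if n < 0 or n >= 100000:
--         return str(n)
--     if n == 0:
--         return '영'
--     return (m[n // 10000]
--             + thousands[n // 1000 % 10]
--             + hundreds[n // 100 % 10]
--             + tens[n // 10 % 10]
--             + units[n % 10])
-- ===== Notes on version B (the rewrite author's own statement) =====
-- stated objective: simpler
-- what changed: Replaced the five-branch recursive digit-group descent with a single non-recursive positional table concatenation over the five decimal digits, with one str(n) fallback for inputs outside 0..99999.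
-- intended difference: For negative n that Python's negative indexing still maps into the units list (those at most ten below zero) A accidentally returns a Korean numeral word or the empty string (e.g. '아홉' for n = -1); B returns str(n), the intended fallback for out-of-range input. — e.g. on native_number(-1): A returns "아홉", B returns "-1"
-- outside the precondition, e.g. on native_number(-11): A raises IndexError, B returns '-11'
import Mathlib
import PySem

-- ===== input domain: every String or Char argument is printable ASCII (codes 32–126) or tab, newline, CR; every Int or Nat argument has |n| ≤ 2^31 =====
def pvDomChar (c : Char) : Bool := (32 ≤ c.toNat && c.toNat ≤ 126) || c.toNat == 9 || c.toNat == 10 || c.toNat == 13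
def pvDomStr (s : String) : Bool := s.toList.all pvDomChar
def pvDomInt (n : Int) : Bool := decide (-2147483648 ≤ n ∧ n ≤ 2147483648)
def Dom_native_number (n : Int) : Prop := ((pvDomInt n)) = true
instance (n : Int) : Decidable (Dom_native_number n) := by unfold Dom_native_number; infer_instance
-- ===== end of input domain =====

-- B replaces A's recursive digit-group descent by one positional table concatenation (objective: simpler).

-- ===== PORT A =====
def pvUnits : List String := ["", "하나", "둘", "셋", "넷", "다섯", "여섯", "일곱", "여덟", "아홉"]
def pvTens : List String := ["", "열", "스물", "서른", "마흔", "쉰", "예순", "일흔", "여든", "아흔"]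
def pvHundreds : List String := ["", "백", "이백", "삼백", "사백", "오백", "육백", "칠백", "팔백", "구백"]
def pvThousands : List String := ["", "천", "이천", "삼천", "사천", "오천", "육천", "칠천", "팔천", "구천"]
def pvM : List String := ["", "만", "이만", "삼만", "사만", "오만", "육만", "칠만", "팔만", "구만"]

-- literal port of A, fuel-guarded (the recursion depth is at most 4, so fuel 8 is never exhausted);
-- list indexing via pyGetD: the default "" is only reachable where Python raises IndexError, excluded by Pre_
def pvGo : Nat → Int → String
  | 0, _ => ""
  | fuel + 1, n =>
    if n = 0 then "영"
    else if n < 10 then PySem.List.pyGetD pvUnits n ""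
    else if n < 100 then
      let ten := PySem.Int.floordiv n 10
      let unit := PySem.Int.mod n 10
      PySem.List.pyGetD pvTens ten "" ++ (if unit ≠ 0 then PySem.List.pyGetD pvUnits unit "" else "")
    else if n < 1000 then
      let hun := PySem.Int.floordiv n 100
      let rem := PySem.Int.mod n 100
      PySem.List.pyGetD pvHundreds hun "" ++ (if rem ≠ 0 then pvGo fuel rem else "")
    else if n < 10000 then
      let tho := PySem.Int.floordiv n 1000
      let rem := PySem.Int.mod n 1000
      PySem.List.pyGetD pvThousands tho "" ++ (if rem ≠ 0 then pvGo fuel rem else "")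
    else if n < 100000 then
      let tho := PySem.Int.floordiv n 10000
      let rem := PySem.Int.mod n 10000
      PySem.List.pyGetD pvM tho "" ++ (if rem ≠ 0 then pvGo fuel rem else "")
    else
      PySem.Int.toStr n

def native_number (n : Int) : String := pvGo 8 n

-- ===== PORT B =====
def native_number_alt (n : Int) : String :=
  if n < 0 ∨ 100000 ≤ n then PySem.Int.toStr n
  else if n = 0 then "영"
  else
    PySem.List.pyGetD pvM (PySem.Int.floordiv n 10000) ""
      ++ PySem.List.pyGetD pvThousands (PySem.Int.mod (PySem.Int.floordiv n 1000) 10) ""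
      ++ PySem.List.pyGetD pvHundreds (PySem.Int.mod (PySem.Int.floordiv n 100) 10) ""
      ++ PySem.List.pyGetD pvTens (PySem.Int.mod (PySem.Int.floordiv n 10) 10) ""
      ++ PySem.List.pyGetD pvUnits (PySem.Int.mod n 10) ""

-- ===== PRECONDITION & SPEC =====
-- Pre_ excludes n ≤ -11, where A raises IndexError (units[n] with a negative index out of range).
def Pre_native_number (n : Int) : Prop := -10 ≤ n
instance (n : Int) : Decidable (Pre_native_number n) := by unfold Pre_native_number; infer_instance
def pvWitness_native_number : Int := 12345

-- For negative n that Python's negative indexing still maps into the units list (those at most ten below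
-- zero) A accidentally returns a Korean numeral word or the empty string (e.g. '아홉' for n = -1);
-- B returns str(n), the intended fallback for out-of-range input.
def D_native_number (n : Int) : Prop := -10 ≤ n ∧ n ≤ -1
instance (n : Int) : Decidable (D_native_number n) := by unfold D_native_number; infer_instance
def Spec_native_number (n : Int) (out : String) : Prop := ¬ D_native_number n → out = native_number_alt n
instance (n : Int) (out : String) : Decidable (Spec_native_number n out) := by unfold Spec_native_number; infer_instance
def pvDiffWitness_native_number : Int := -1
def pvDiffWitnessOut_native_number : String × String := ("아홉", "-1")

-- ===== CLAIM (what is proved, stated in full; the proofs are below) =====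
def Claim_unchanged_native_number : Prop := ∀ (n : Int), Dom_native_number n → Pre_native_number n → Spec_native_number n (native_number n)
def Claim_changed_native_number : Prop := Dom_native_number (pvDiffWitness_native_number) ∧ Pre_native_number (pvDiffWitness_native_number) ∧ D_native_number (pvDiffWitness_native_number) ∧ native_number (pvDiffWitness_native_number) = pvDiffWitnessOut_native_number.1 ∧ native_number_alt (pvDiffWitness_native_number) = pvDiffWitnessOut_native_number.2 ∧ pvDiffWitnessOut_native_number.1 ≠ pvDiffWitnessOut_native_number.2
def Claim_exact_native_number : Prop := ∀ (n : Int), Dom_native_number n → Pre_native_number n → D_native_number n → native_number n ≠ native_number_alt n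

-- ===== LEMMAS AND PROOFS =====

-- the digit-concatenation core both programs produce for 1 ≤ n < 100000 (proof-side helper)
def pvCore (n : Int) : String :=
  PySem.List.pyGetD pvM (n / 10000) ""
    ++ PySem.List.pyGetD pvThousands (n / 1000 % 10) ""
    ++ PySem.List.pyGetD pvHundreds (n / 100 % 10) ""
    ++ PySem.List.pyGetD pvTens (n / 10 % 10) ""
    ++ PySem.List.pyGetD pvUnits (n % 10) ""

theorem pv_if_units (i : Int) (h0 : 0 ≤ i) (h10 : i < 10) :
    (if i ≠ 0 then PySem.List.pyGetD pvUnits i "" else "") = PySem.List.pyGetD pvUnits i "" := by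
  by_cases h : i = 0
  · subst h; decide
  · rw [if_pos h]

theorem pvGo_small (fuel : Nat) (n : Int) (h1 : 1 ≤ n) (h2 : n < 100) :
    pvGo (fuel + 1) n = pvCore n := by
  rw [pvCore]
  have e0 : n / 10000 = 0 := by omega
  have e1 : n / 1000 % 10 = 0 := by omega
  have e2 : n / 100 % 10 = 0 := by omega
  rw [e0, e1, e2]
  by_cases h10 : n < 10
  · have e3 : n / 10 % 10 = 0 := by omega
    have e4 : n % 10 = n := by omega
    rw [e3, e4]
    simp only [pvGo, if_neg (by omega : ¬ n = 0), if_pos h10]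
    simp [pvM, pvThousands, pvHundreds, pvTens, String.empty_append]
  · have e3 : n / 10 % 10 = n / 10 := by omega
    rw [e3]
    simp only [pvGo, if_neg (by omega : ¬ n = 0), if_neg h10, if_pos h2]
    rw [PySem.Int.floordiv_eq_ediv_of_pos (by norm_num), PySem.Int.mod_eq_emod_of_pos (by norm_num)]
    rw [pv_if_units (n % 10) (by omega) (by omega)]
    simp [pvM, pvThousands, pvHundreds, String.empty_append]

theorem pvGo_step (fuel : Nat) (b : Int) (_hb : b = 100 ∨ b = 1000 ∨ b = 10000)
    (tbl : List String) (n : Int) (h1 : b ≤ n) (h2 : n < 10 * b)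
    (hrec : ∀ m : Int, 1 ≤ m → m < b → pvGo fuel m = pvCore m)
    (hcore : ∀ m : Int, b ≤ m → m < 10 * b →
      pvCore m = PySem.List.pyGetD tbl (m / b) "" ++ pvCore (m % b)) :
    PySem.List.pyGetD tbl (PySem.Int.floordiv n b) ""
      ++ (if PySem.Int.mod n b ≠ 0 then pvGo fuel (PySem.Int.mod n b) else "")
      = pvCore n := by
  have hbpos : (0 : Int) < b := by omega
  rw [PySem.Int.floordiv_eq_ediv_of_pos hbpos, PySem.Int.mod_eq_emod_of_pos hbpos]
  rw [hcore n h1 h2]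
  have hb0 : 0 ≤ n % b := Int.emod_nonneg n (by omega)
  have hblt : n % b < b := Int.emod_lt_of_pos n hbpos
  by_cases hr : n % b = 0
  · rw [hr, if_neg (fun hc => hc rfl)]
    have hc0 : pvCore 0 = "" := by decide
    rw [hc0]
  · rw [if_pos hr, hrec (n % b) (by omega) hblt]

theorem pvCore_split_100 (m : Int) (h1 : 100 ≤ m) (h2 : m < 1000) :
    pvCore m = PySem.List.pyGetD pvHundreds (m / 100) "" ++ pvCore (m % 100) := by
  rw [pvCore, pvCore]
  have e0 : m / 10000 = 0 := by omega
  have e1 : m / 1000 % 10 = 0 := by omega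
  have e2 : m / 100 % 10 = m / 100 := by omega
  have f0 : m % 100 / 10000 = 0 := by omega
  have f1 : m % 100 / 1000 % 10 = 0 := by omega
  have f2 : m % 100 / 100 % 10 = 0 := by omega
  have f3 : m % 100 / 10 % 10 = m / 10 % 10 := by omega
  have f4 : m % 100 % 10 = m % 10 := by omega
  rw [e0, e1, e2, f0, f1, f2, f3, f4]
  simp [pvM, pvThousands, pvHundreds, String.empty_append, String.append_assoc]

theorem pvCore_split_1000 (m : Int) (h1 : 1000 ≤ m) (h2 : m < 10000) :
    pvCore m = PySem.List.pyGetD pvThousands (m / 1000) "" ++ pvCore (m % 1000) := by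
  rw [pvCore, pvCore]
  have e0 : m / 10000 = 0 := by omega
  have e1 : m / 1000 % 10 = m / 1000 := by omega
  have f0 : m % 1000 / 10000 = 0 := by omega
  have f1 : m % 1000 / 1000 % 10 = 0 := by omega
  have f2 : m % 1000 / 100 % 10 = m / 100 % 10 := by omega
  have f3 : m % 1000 / 10 % 10 = m / 10 % 10 := by omega
  have f4 : m % 1000 % 10 = m % 10 := by omega
  rw [e0, e1, f0, f1, f2, f3, f4]
  simp [pvM, pvThousands, String.empty_append, String.append_assoc]

theorem pvCore_split_10000 (m : Int) (_h1 : 10000 ≤ m) (_h2 : m < 100000) :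
    pvCore m = PySem.List.pyGetD pvM (m / 10000) "" ++ pvCore (m % 10000) := by
  rw [pvCore, pvCore]
  have f0 : m % 10000 / 10000 = 0 := by omega
  have f1 : m % 10000 / 1000 % 10 = m / 1000 % 10 := by omega
  have f2 : m % 10000 / 100 % 10 = m / 100 % 10 := by omega
  have f3 : m % 10000 / 10 % 10 = m / 10 % 10 := by omega
  have f4 : m % 10000 % 10 = m % 10 := by omega
  rw [f0, f1, f2, f3, f4]
  simp [pvM, String.empty_append, String.append_assoc]

theorem pvGo_mid (fuel : Nat) (n : Int) (h1 : 1 ≤ n) (h2 : n < 1000) :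
    pvGo (fuel + 2) n = pvCore n := by
  by_cases hs : n < 100
  · exact pvGo_small (fuel + 1) n h1 hs
  · simp only [pvGo, if_neg (by omega : ¬ n = 0), if_neg (by omega : ¬ n < 10),
      if_neg (by omega : ¬ n < 100), if_pos h2]
    exact pvGo_step (fuel + 1) 100 (by norm_num) pvHundreds n (by omega) (by omega)
      (fun m hm1 hm2 => pvGo_small fuel m hm1 hm2)
      (fun m hm1 hm2 => pvCore_split_100 m hm1 hm2)

theorem pvGo_high (fuel : Nat) (n : Int) (h1 : 1 ≤ n) (h2 : n < 10000) :
    pvGo (fuel + 3) n = pvCore n := by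
  by_cases hs : n < 1000
  · exact pvGo_mid (fuel + 1) n h1 hs
  · simp only [pvGo, if_neg (by omega : ¬ n = 0), if_neg (by omega : ¬ n < 10),
      if_neg (by omega : ¬ n < 100), if_neg (by omega : ¬ n < 1000), if_pos h2]
    exact pvGo_step (fuel + 2) 1000 (by norm_num) pvThousands n (by omega) (by omega)
      (fun m hm1 hm2 => pvGo_mid fuel m hm1 hm2)
      (fun m hm1 hm2 => pvCore_split_1000 m hm1 hm2)

theorem pvGo_top (fuel : Nat) (n : Int) (h1 : 1 ≤ n) (h2 : n < 100000) :
    pvGo (fuel + 4) n = pvCore n := by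
  by_cases hs : n < 10000
  · exact pvGo_high (fuel + 1) n h1 hs
  · simp only [pvGo, if_neg (by omega : ¬ n = 0), if_neg (by omega : ¬ n < 10),
      if_neg (by omega : ¬ n < 100), if_neg (by omega : ¬ n < 1000),
      if_neg (by omega : ¬ n < 10000), if_pos h2]
    exact pvGo_step (fuel + 3) 10000 (by norm_num) pvM n (by omega) (by omega)
      (fun m hm1 hm2 => pvGo_high fuel m hm1 hm2)
      (fun m hm1 hm2 => pvCore_split_10000 m hm1 hm2)

theorem alt_eq_core (n : Int) (h1 : 1 ≤ n) (h2 : n < 100000) :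
    native_number_alt n = pvCore n := by
  rw [native_number_alt, if_neg (by omega), if_neg (by omega), pvCore]
  rw [PySem.Int.floordiv_eq_ediv_of_pos (by norm_num : (0:Int) < 10000),
    PySem.Int.floordiv_eq_ediv_of_pos (by norm_num : (0:Int) < 1000),
    PySem.Int.floordiv_eq_ediv_of_pos (by norm_num : (0:Int) < 100),
    PySem.Int.floordiv_eq_ediv_of_pos (by norm_num : (0:Int) < 10),
    PySem.Int.mod_eq_emod_of_pos (by norm_num : (0:Int) < 10),
    PySem.Int.mod_eq_emod_of_pos (by norm_num : (0:Int) < 10),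
    PySem.Int.mod_eq_emod_of_pos (by norm_num : (0:Int) < 10),
    PySem.Int.mod_eq_emod_of_pos (by norm_num : (0:Int) < 10)]

theorem pvGo_big (fuel : Nat) (n : Int) (h : 100000 ≤ n) : pvGo (fuel + 1) n = PySem.Int.toStr n := by
  simp only [pvGo, if_neg (by omega : ¬ n = 0), if_neg (by omega : ¬ n < 10),
    if_neg (by omega : ¬ n < 100), if_neg (by omega : ¬ n < 1000),
    if_neg (by omega : ¬ n < 10000), if_neg (by omega : ¬ n < 100000)]

theorem native_number_big (n : Int) (h : 100000 ≤ n) : native_number n = PySem.Int.toStr n := by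
  rw [native_number]
  exact pvGo_big 7 n h

theorem native_number_spec : Claim_unchanged_native_number := by
  intro n _ hpre hnd
  unfold Pre_native_number at hpre
  unfold D_native_number at hnd
  by_cases h0 : n = 0
  · subst h0; decide
  · by_cases hneg : n < 0
    · exact absurd ⟨hpre, by omega⟩ hnd
    · by_cases hbig : 100000 ≤ n
      · rw [native_number_big n hbig, native_number_alt, if_pos (Or.inr hbig)]
      · have h1 : 1 ≤ n := by omega
        have h2 : n < 100000 := by omega
        rw [alt_eq_core n h1 h2]
        show pvGo (4 + 4) n = pvCore n
        exact pvGo_top 4 n h1 h2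

theorem native_number_changed : Claim_changed_native_number := by
  unfold Claim_changed_native_number; decide

theorem native_number_tight : Claim_exact_native_number := by
  intro n _ _ hd
  unfold D_native_number at hd
  obtain ⟨h1, h2⟩ := hd
  interval_cases n <;> decide
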